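-- pv_equiv track=rewrite | github.com/fcxfcx/FoV_Simulator | evaluate.py | count_overlap
-- ===== SOURCE A (Python) =====
-- def count_overlap(x1, y1, x2, y2):
--     """计算两个中心点附近九宫格区域的重合部分
--
--     Args:
--         x1 (int): 第一个中心点的x坐标
--         y1 (int): 第一个中心点的y坐标
--         x2 (int): 第二个中心点的x坐标
--         y2 (int): 第二个中心点的y坐标
--
--     Returns:
--         int: 重合格子的数量
--     """
--     # 计算第一个视野区域的范围
--     left1 = (x1 - 1) % 9
--     right1 = (x1 + 1) % 9
--     top1 = (y1 - 1) % 16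
--     bottom1 = (y1 + 1) % 16
--
--     # 计算第二个视野区域的范围
--     left2 = (x2 - 1) % 9
--     right2 = (x2 + 1) % 9
--     top2 = (y2 - 1) % 16
--     bottom2 = (y2 + 1) % 16
--
--     # 计算两个视野区域的重叠格子数量
--     overlap_count = 0
--
--     if (left1 <= right1 and top1 <= bottom1) and (left2 <= right2 and top2 <= bottom2):
--         for i in range(left1, right1 + 1):
--             for j in range(top1, bottom1 + 1):
--                 if i >= left2 and i <= right2 and j >= top2 and j <= bottom2:
--                     overlap_count += 1
--     else:
--         for i in range(left1, 9):
--             for j in range(top1, 16):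
--                 if i >= left2 and i <= right2 and j >= top2 and j <= bottom2:
--                     overlap_count += 1
--         for i in range(0, right1 + 1):
--             for j in range(top1, 16):
--                 if i >= left2 and i <= right2 and j >= top2 and j <= bottom2:
--                     overlap_count += 1
--
--     return overlap_count
-- ===== SOURCE B (Python) =====
-- def count_overlap(x1, y1, x2, y2):
--     """Closed-form: the count factorizes into (qualifying columns) x (qualifying rows)."""
--     left1, right1 = (x1 - 1) % 9, (x1 + 1) % 9
--     top1, bottom1 = (y1 - 1) % 16, (y1 + 1) % 16
--     left2, right2 = (x2 - 1) % 9, (x2 + 1) % 9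
--     top2, bottom2 = (y2 - 1) % 16, (y2 + 1) % 16
--
--     def seg(a, b, c, d):
--         # number of integers in [a, b] ∩ [c, d]
--         return max(0, min(b, d) - max(a, c) + 1)
--
--     if left1 <= right1 and top1 <= bottom1 and left2 <= right2 and top2 <= bottom2:
--         return seg(left1, right1, left2, right2) * seg(top1, bottom1, top2, bottom2)
--     return (seg(left1, 8, left2, right2) + seg(0, right1, left2, right2)) * seg(top1, 15, top2, bottom2)
-- ===== Notes on version B (the rewrite author's own statement) =====
-- stated objective: simpler
-- what changed: Replaced A's four nested counting loops over the 3x3/torus neighborhoods by a closed-form product of interval-intersection lengths (seg(a,b,c,d)=max(0,min(b,d)-max(a,c)+1)), summing the two wrapped column pieces in the else case.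
import Mathlib
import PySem

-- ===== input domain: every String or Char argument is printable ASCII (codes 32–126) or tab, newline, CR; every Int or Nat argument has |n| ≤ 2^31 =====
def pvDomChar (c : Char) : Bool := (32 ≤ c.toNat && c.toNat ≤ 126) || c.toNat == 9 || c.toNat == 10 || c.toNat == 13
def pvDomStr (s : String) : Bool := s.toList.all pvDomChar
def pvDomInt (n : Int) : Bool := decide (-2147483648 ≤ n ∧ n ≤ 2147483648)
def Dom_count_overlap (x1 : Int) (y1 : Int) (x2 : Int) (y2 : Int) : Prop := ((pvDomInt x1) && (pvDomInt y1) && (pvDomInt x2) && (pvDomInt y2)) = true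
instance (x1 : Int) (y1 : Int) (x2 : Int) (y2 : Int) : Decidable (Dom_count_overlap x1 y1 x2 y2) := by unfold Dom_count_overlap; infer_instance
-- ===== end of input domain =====

-- B replaces A's nested counting loops over the torus neighborhoods by a closed-form
-- interval-intersection product (objective: simpler; constant-time instead of loops).

-- ===== PORT A =====
def count_overlap (x1 : Int) (y1 : Int) (x2 : Int) (y2 : Int) : Int :=
  let left1 := PySem.Int.mod (x1 - 1) 9
  let right1 := PySem.Int.mod (x1 + 1) 9
  let top1 := PySem.Int.mod (y1 - 1) 16
  let bottom1 := PySem.Int.mod (y1 + 1) 16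
  let left2 := PySem.Int.mod (x2 - 1) 9
  let right2 := PySem.Int.mod (x2 + 1) 9
  let top2 := PySem.Int.mod (y2 - 1) 16
  let bottom2 := PySem.Int.mod (y2 + 1) 16
  if (left1 ≤ right1 ∧ top1 ≤ bottom1) ∧ (left2 ≤ right2 ∧ top2 ≤ bottom2) then
    (PySem.List.pyRange left1 (right1 + 1) 1).foldl (fun acc i =>
      (PySem.List.pyRange top1 (bottom1 + 1) 1).foldl (fun acc j =>
        if left2 ≤ i ∧ i ≤ right2 ∧ top2 ≤ j ∧ j ≤ bottom2 then acc + 1 else acc) acc) 0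
  else
    let c1 := (PySem.List.pyRange left1 9 1).foldl (fun acc i =>
      (PySem.List.pyRange top1 16 1).foldl (fun acc j =>
        if left2 ≤ i ∧ i ≤ right2 ∧ top2 ≤ j ∧ j ≤ bottom2 then acc + 1 else acc) acc) 0
    (PySem.List.pyRange 0 (right1 + 1) 1).foldl (fun acc i =>
      (PySem.List.pyRange top1 16 1).foldl (fun acc j =>
        if left2 ≤ i ∧ i ≤ right2 ∧ top2 ≤ j ∧ j ≤ bottom2 then acc + 1 else acc) acc) c1

-- ===== PORT B =====
-- seg a b c d = number of integers in [a,b] ∩ [c,d]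
def pvSeg (a b c d : Int) : Int := max 0 (min b d - max a c + 1)

def count_overlap_alt (x1 : Int) (y1 : Int) (x2 : Int) (y2 : Int) : Int :=
  let left1 := PySem.Int.mod (x1 - 1) 9
  let right1 := PySem.Int.mod (x1 + 1) 9
  let top1 := PySem.Int.mod (y1 - 1) 16
  let bottom1 := PySem.Int.mod (y1 + 1) 16
  let left2 := PySem.Int.mod (x2 - 1) 9
  let right2 := PySem.Int.mod (x2 + 1) 9
  let top2 := PySem.Int.mod (y2 - 1) 16
  let bottom2 := PySem.Int.mod (y2 + 1) 16
  if left1 ≤ right1 ∧ top1 ≤ bottom1 ∧ left2 ≤ right2 ∧ top2 ≤ bottom2 then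
    pvSeg left1 right1 left2 right2 * pvSeg top1 bottom1 top2 bottom2
  else
    (pvSeg left1 8 left2 right2 + pvSeg 0 right1 left2 right2) * pvSeg top1 15 top2 bottom2

-- ===== PRECONDITION & SPEC =====
def Spec_count_overlap (x1 : Int) (y1 : Int) (x2 : Int) (y2 : Int) (out : Int) : Prop := out = count_overlap_alt x1 y1 x2 y2
instance (x1 : Int) (y1 : Int) (x2 : Int) (y2 : Int) (out : Int) : Decidable (Spec_count_overlap x1 y1 x2 y2 out) := by unfold Spec_count_overlap; infer_instance

-- ===== CLAIM (what is proved, stated in full; the proofs are below) =====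
def Claim_equal_count_overlap : Prop := ∀ (x1 : Int) (y1 : Int) (x2 : Int) (y2 : Int), Dom_count_overlap x1 y1 x2 y2 → Spec_count_overlap x1 y1 x2 y2 (count_overlap x1 y1 x2 y2)

-- ===== LEMMAS AND PROOFS =====

-- counting loop over one coordinate: counts j ∈ [t, bb) with t2 ≤ j ≤ b2
theorem count_fold (t2 b2 : Int) : ∀ (n : Nat) (t bb s : Int), (bb - t).toNat = n →
    ((PySem.List.pyRange t bb 1).foldl (fun acc j => if t2 ≤ j ∧ j ≤ b2 then acc + 1 else acc) s)
      = s + pvSeg t (bb - 1) t2 b2 := by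
  intro n
  induction n with
  | zero =>
    intro t bb s h
    rw [PySem.List.pyRange_one_eq_nil (by omega)]
    have h0 : pvSeg t (bb - 1) t2 b2 = 0 := by simp only [pvSeg]; omega
    simp [h0]
  | succ n ih =>
    intro t bb s h
    rw [PySem.List.pyRange_one_cons (by omega)]
    simp only [List.foldl_cons]
    rw [ih (t + 1) bb _ (by omega)]
    have hS : pvSeg t (bb - 1) t2 b2
        = pvSeg (t + 1) (bb - 1) t2 b2 + (if t2 ≤ t ∧ t ≤ b2 then 1 else 0) := by
      split_ifs with ht <;> (simp only [pvSeg]; omega)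
    rw [hS]; split_ifs with ht <;> ring

-- the inner counting loop, gated by the i-condition
theorem inner_fold (t bb c d t2 b2 : Int) (i s : Int) :
    ((PySem.List.pyRange t bb 1).foldl (fun acc j =>
        if c ≤ i ∧ i ≤ d ∧ t2 ≤ j ∧ j ≤ b2 then acc + 1 else acc) s)
      = if c ≤ i ∧ i ≤ d then s + pvSeg t (bb - 1) t2 b2 else s := by
  by_cases hi : c ≤ i ∧ i ≤ d
  · rw [if_pos hi]
    have he : (fun (acc j : Int) => if c ≤ i ∧ i ≤ d ∧ t2 ≤ j ∧ j ≤ b2 then acc + 1 else acc)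
        = (fun acc j => if t2 ≤ j ∧ j ≤ b2 then acc + 1 else acc) := by
      funext acc j
      simp only [hi.1, hi.2, true_and]
    rw [he, count_fold t2 b2 (bb - t).toNat t bb s rfl]
  · rw [if_neg hi]
    have he : (fun (acc j : Int) => if c ≤ i ∧ i ≤ d ∧ t2 ≤ j ∧ j ≤ b2 then acc + 1 else acc)
        = (fun acc _ => acc) := by
      funext acc j
      rw [if_neg (fun h => hi ⟨h.1, h.2.1⟩)]
    rw [he, List.foldl_fixed]

-- the full double loop is a product of two interval-intersection lengths
theorem double_fold (a b c d t bb t2 b2 s : Int) :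
    ((PySem.List.pyRange a b 1).foldl (fun acc i =>
        (PySem.List.pyRange t bb 1).foldl (fun acc j =>
          if c ≤ i ∧ i ≤ d ∧ t2 ≤ j ∧ j ≤ b2 then acc + 1 else acc) acc) s)
      = s + pvSeg a (b - 1) c d * pvSeg t (bb - 1) t2 b2 := by
  suffices H : ∀ (n : Nat) (a s : Int), (b - a).toNat = n →
      ((PySem.List.pyRange a b 1).foldl (fun acc i =>
        (PySem.List.pyRange t bb 1).foldl (fun acc j =>
          if c ≤ i ∧ i ≤ d ∧ t2 ≤ j ∧ j ≤ b2 then acc + 1 else acc) acc) s)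
      = s + pvSeg a (b - 1) c d * pvSeg t (bb - 1) t2 b2 by
    exact H (b - a).toNat a s rfl
  intro n
  induction n with
  | zero =>
    intro a s h
    rw [show PySem.List.pyRange a b 1 = [] from PySem.List.pyRange_one_eq_nil (by omega)]
    have h0 : pvSeg a (b - 1) c d = 0 := by simp only [pvSeg]; omega
    simp [h0]
  | succ n ih =>
    intro a s h
    rw [show PySem.List.pyRange a b 1 = a :: PySem.List.pyRange (a + 1) b 1 from
      PySem.List.pyRange_one_cons (by omega)]
    simp only [List.foldl_cons]
    rw [inner_fold, ih (a + 1) _ (by omega)]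
    have hS : pvSeg a (b - 1) c d
        = pvSeg (a + 1) (b - 1) c d + (if c ≤ a ∧ a ≤ d then 1 else 0) := by
      split_ifs with ha <;> (simp only [pvSeg]; omega)
    rw [hS]; split_ifs with ha <;> ring

-- ===== VERDICT (by name: the statement is the Claim_ definition above) =====
theorem count_overlap_spec : Claim_equal_count_overlap := by
  intro x1 y1 x2 y2 _
  unfold Spec_count_overlap count_overlap count_overlap_alt
  simp only [double_fold]
  split_ifs with h1 h2 h2 <;> try (exfalso; tauto)
  · norm_num
  · norm_num; ring
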